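-- pv_equiv track=rewrite | github.com/entertainingrover01/Flight_Agent_V2 | backend/tools/claim_tools.py | _extract_code_parts
-- ===== SOURCE A (Python) =====
-- def _extract_code_parts(flight_number: str) -> tuple[str, str]:
--     normalized = flight_number.upper().replace(" ", "")
--     prefix = ""
--     digits = ""
--     for char in normalized:
--         if char.isalpha() and not digits:
--             prefix += char
--         elif char.isdigit():
--             digits += char
--     return prefix, digits
-- ===== SOURCE B (Python) =====
-- def _extract_code_parts(flight_number: str) -> tuple[str, str]:
--     normalized = flight_number.upper().replace(" ", "")
--     idx = next((i for i, c in enumerate(normalized) if c.isdigit()), len(normalized))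
--     prefix = "".join(c for c in normalized[:idx] if c.isalpha())
--     digits = "".join(c for c in normalized if c.isdigit())
--     return prefix, digits
-- ===== Notes on version B (the rewrite author's own statement) =====
-- stated objective: alternative
-- what changed: Replaces the single stateful flag-gated accumulation loop with a first-digit boundary search followed by two independent filter passes (letters before the boundary, digits anywhere).
import Mathlib
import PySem

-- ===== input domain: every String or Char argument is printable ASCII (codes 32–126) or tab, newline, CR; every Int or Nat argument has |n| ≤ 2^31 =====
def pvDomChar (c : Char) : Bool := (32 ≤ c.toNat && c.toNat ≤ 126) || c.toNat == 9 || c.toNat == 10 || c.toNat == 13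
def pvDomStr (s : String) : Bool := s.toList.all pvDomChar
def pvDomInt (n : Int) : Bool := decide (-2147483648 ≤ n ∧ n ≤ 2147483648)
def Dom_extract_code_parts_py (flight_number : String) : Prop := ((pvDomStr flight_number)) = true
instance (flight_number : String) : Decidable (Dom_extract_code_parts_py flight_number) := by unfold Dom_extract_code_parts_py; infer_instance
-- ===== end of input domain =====

-- B replaces A's single flag-gated accumulation loop by a first-digit boundary search plus two
-- independent filter passes (alternative decomposition, same cost).


-- ===== PORT A =====
-- A's for-loop over the normalized characters with the (prefix, digits) accumulator;
-- 'not digits' is the emptiness test of the digits accumulator.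
def extract_code_parts_py (flight_number : String) : String × String :=
  let normalized := PySem.Str.replace (PySem.Str.upper flight_number) " " ""
  let acc := normalized.toList.foldl
    (fun (acc : List Char × List Char) char =>
      if PySem.Chars.isalpha char && decide (acc.2 = []) then (acc.1 ++ [char], acc.2)
      else if PySem.Chars.isdigit char then (acc.1, acc.2 ++ [char])
      else acc)
    ([], [])
  (String.ofList acc.1, String.ofList acc.2)

-- ===== PORT B =====
-- B: boundary = index of first digit (list length if none, like next(..., len)); then two filters.
def extract_code_parts_py_alt (flight_number : String) : String × String :=
  let normalized := (PySem.Str.replace (PySem.Str.upper flight_number) " " "").toList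
  let idx := normalized.findIdx PySem.Chars.isdigit
  let pre := (normalized.take idx).filter PySem.Chars.isalpha
  let digits := normalized.filter PySem.Chars.isdigit
  (String.ofList pre, String.ofList digits)

-- ===== PRECONDITION & SPEC =====
def Spec_extract_code_parts_py (flight_number : String) (out : String × String) : Prop := out = extract_code_parts_py_alt flight_number
instance (flight_number : String) (out : String × String) : Decidable (Spec_extract_code_parts_py flight_number out) := by unfold Spec_extract_code_parts_py; infer_instance

-- ===== CLAIM (what is proved, stated in full; the proofs are below) =====
def Claim_equal_extract_code_parts_py : Prop := ∀ (flight_number : String), Dom_extract_code_parts_py flight_number → Spec_extract_code_parts_py flight_number (extract_code_parts_py flight_number)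

-- ===== LEMMAS AND PROOFS =====

theorem pv_alpha_not_digit (c : Char) (h : PySem.Chars.isalpha c = true) :
    PySem.Chars.isdigit c = false := by
  simp [PySem.Chars.isalpha, PySem.Chars.isupper, PySem.Chars.islower, PySem.Chars.isdigit,
    Char.le_def, UInt32.le_iff_toNat_le] at *
  omega

def pvStep (acc : List Char × List Char) (char : Char) : List Char × List Char :=
  if PySem.Chars.isalpha char && decide (acc.2 = []) then (acc.1 ++ [char], acc.2)
  else if PySem.Chars.isdigit char then (acc.1, acc.2 ++ [char])
  else acc

theorem pv_loop_ne (l : List Char) (p d : List Char) (h : d ≠ []) :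
    l.foldl pvStep (p, d) = (p, d ++ l.filter PySem.Chars.isdigit) := by
  induction l generalizing d with
  | nil => simp
  | cons c t ih =>
    have hd : decide (d = []) = false := by simpa using h
    simp only [List.foldl_cons, pvStep, hd, Bool.and_false, Bool.false_eq_true, if_false]
    by_cases hc : PySem.Chars.isdigit c = true
    · rw [if_pos hc, ih (d ++ [c]) (by simp)]
      simp [hc]
    · rw [if_neg hc, ih d h]
      simp [hc]

theorem pv_loop_nil (l : List Char) (p : List Char) :
    l.foldl pvStep (p, []) =
      (p ++ (l.take (l.findIdx PySem.Chars.isdigit)).filter PySem.Chars.isalpha,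
       l.filter PySem.Chars.isdigit) := by
  induction l generalizing p with
  | nil => simp
  | cons c t ih =>
    simp only [List.foldl_cons, pvStep, List.findIdx_cons, decide_true]
    by_cases ha : PySem.Chars.isalpha c = true
    · have hd := pv_alpha_not_digit c ha
      simp only [ha, Bool.and_true, if_true]
      rw [ih (p ++ [c])]
      simp [hd, ha, List.take_succ_cons]
    · simp only [ha, Bool.false_and, Bool.false_eq_true, if_false]
      by_cases hc : PySem.Chars.isdigit c = true
      · rw [if_pos hc, List.nil_append, pv_loop_ne t p [c] (by simp)]
        simp [hc]
      · rw [if_neg hc, ih p]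
        simp [hc, ha, List.take_succ_cons]

-- ===== VERDICT (by name: the statement is the Claim_ definition above) =====
theorem extract_code_parts_py_spec : Claim_equal_extract_code_parts_py := by
  intro fn _
  unfold Spec_extract_code_parts_py extract_code_parts_py extract_code_parts_py_alt
  simp only []
  rw [show (fun (acc : List Char × List Char) char =>
      if PySem.Chars.isalpha char && decide (acc.2 = []) then (acc.1 ++ [char], acc.2)
      else if PySem.Chars.isdigit char then (acc.1, acc.2 ++ [char])
      else acc) = pvStep from rfl]
  rw [pv_loop_nil]
  simp
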